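-- pv_equiv track=rewrite | github.com/Kenjicci/Statistical-Tools-for-Thesis-2 | Objective 3/Step 4 - QS - Range Trial.py | select_parameters
-- ===== SOURCE A (Python) =====
-- from typing import List, Tuple, Optional, Dict
--
-- def select_parameters(bit_size: int) -> Tuple[int, int]:
--     """
--     Select optimal parameters based on bit size of N.
--
--     Args:
--         bit_size: Number of bits in N
--
--     Returns:
--         Tuple of (factor_base_bound, sieve_range)
--     """
--     params = {
--         30: (800, 1500),
--         40: (1000, 3000),
--         50: (5000, 14000),
--         60: (10000, 18000),
--         70: (30000, 60000),
--         80: (60000, 120000),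
--         90: (150000, 300000),
--         100: (300000, 450000),
--         110: (1100000, 1700000),
--         120: (1200000, 1800000),
--         128: (1800000, 3200000),
--     }
--
--     for size, (B, M) in params.items():
--         if bit_size <= size:
--             return B, M
--
--     # Default for larger numbers
--     B = min(30000, bit_size * 250)
--     M = min(100000, bit_size * 800)
--     return B, M
-- ===== SOURCE B (Python) =====
-- def select_parameters(bit_size: int):
--     thresholds = [30, 40, 50, 60, 70, 80, 90, 100, 110, 120, 128]
--     values = [(800, 1500), (1000, 3000), (5000, 14000), (10000, 18000),
--               (30000, 60000), (60000, 120000), (150000, 300000),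
--               (300000, 450000), (1100000, 1700000), (1200000, 1800000),
--               (1800000, 3200000)]
--     # binary search: index of first threshold >= bit_size (bisect_left)
--     lo, hi = 0, len(thresholds)
--     while lo < hi:
--         mid = (lo + hi) // 2
--         if thresholds[mid] < bit_size:
--             lo = mid + 1
--         else:
--             hi = mid
--     if lo < len(values):
--         return values[lo]
--     return (min(30000, bit_size * 250), min(100000, bit_size * 800))
-- ===== Notes on version B (the rewrite author's own statement) =====
-- stated objective: alternative
-- what changed: Replaces the sequential scan over the dict of thresholds with a hand-written bisect_left binary search over a sorted threshold list and a parallel value list, falling through to the default formula when the index is past the end.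
import Mathlib
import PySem

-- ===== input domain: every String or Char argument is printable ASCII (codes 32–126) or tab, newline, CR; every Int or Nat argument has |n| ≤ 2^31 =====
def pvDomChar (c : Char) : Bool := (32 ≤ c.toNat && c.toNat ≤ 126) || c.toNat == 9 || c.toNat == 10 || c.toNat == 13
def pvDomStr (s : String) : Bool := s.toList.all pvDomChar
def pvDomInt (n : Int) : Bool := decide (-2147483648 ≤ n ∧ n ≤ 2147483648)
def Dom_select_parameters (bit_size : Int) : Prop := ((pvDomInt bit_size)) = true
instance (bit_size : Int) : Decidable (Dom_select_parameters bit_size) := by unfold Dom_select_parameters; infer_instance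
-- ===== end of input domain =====

-- B replaces A's sequential scan of the table with a binary search (bisect_left) over a
-- sorted threshold list and a parallel value list; same result, different decomposition.

-- ===== PORT A =====
-- the dict literal of A, in insertion order
def pvParamsA : List (Int × (Int × Int)) :=
  [(30, (800, 1500)), (40, (1000, 3000)), (50, (5000, 14000)), (60, (10000, 18000)),
   (70, (30000, 60000)), (80, (60000, 120000)), (90, (150000, 300000)),
   (100, (300000, 450000)), (110, (1100000, 1700000)), (120, (1200000, 1800000)),
   (128, (1800000, 3200000))]

-- the 'for size, (B, M) in params.items(): if bit_size <= size: return B, M' loop,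
-- falling through to the default computation
def pvScanA (bit_size : Int) : List (Int × (Int × Int)) → Int × Int
  | [] => (min 30000 (bit_size * 250), min 100000 (bit_size * 800))
  | (size, v) :: rest => if bit_size ≤ size then v else pvScanA bit_size rest

def select_parameters (bit_size : Int) : Int × Int := pvScanA bit_size pvParamsA

-- ===== PORT B =====
def pvThresholds : List Int := [30, 40, 50, 60, 70, 80, 90, 100, 110, 120, 128]
def pvValues : List (Int × Int) :=
  [(800, 1500), (1000, 3000), (5000, 14000), (10000, 18000), (30000, 60000),
   (60000, 120000), (150000, 300000), (300000, 450000), (1100000, 1700000),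
   (1200000, 1800000), (1800000, 3200000)]

-- Source B's hand-written bisect_left while-loop; fuel only makes the loop total
-- (hi - lo strictly decreases, fuel = length + 1 suffices)
def pvBisect (x : Int) : Nat → Nat → Nat → Nat
  | 0, lo, _ => lo
  | fuel + 1, lo, hi =>
    if lo < hi then
      let mid := (lo + hi) / 2
      if pvThresholds.getD mid 0 < x then pvBisect x fuel (mid + 1) hi
      else pvBisect x fuel lo mid
    else lo

def select_parameters_alt (bit_size : Int) : Int × Int :=
  let lo := pvBisect bit_size 12 0 pvThresholds.length
  match pvValues[lo]? with
  | some v => v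
  | none => (min 30000 (bit_size * 250), min 100000 (bit_size * 800))

-- ===== PRECONDITION & SPEC =====
def Spec_select_parameters (bit_size : Int) (out : Int × Int) : Prop := out = select_parameters_alt bit_size
instance (bit_size : Int) (out : Int × Int) : Decidable (Spec_select_parameters bit_size out) := by unfold Spec_select_parameters; infer_instance

-- ===== CLAIM (what is proved, stated in full; the proofs are below) =====
def Claim_equal_select_parameters : Prop := ∀ (bit_size : Int), Dom_select_parameters bit_size → Spec_select_parameters bit_size (select_parameters bit_size)

-- ===== LEMMAS AND PROOFS =====

-- ===== VERDICT (by name: the statement is the Claim_ definition above) =====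
theorem select_parameters_spec : Claim_equal_select_parameters := by
  intro b _
  unfold Spec_select_parameters select_parameters select_parameters_alt
  by_cases h30 : b ≤ 30
  · simp [pvScanA, pvParamsA, pvBisect, pvThresholds, pvValues, (show b ≤ 30 by omega), (show ¬((30:Int) < b) by omega), (show b ≤ 40 by omega), (show ¬((40:Int) < b) by omega), (show b ≤ 50 by omega), (show ¬((50:Int) < b) by omega), (show b ≤ 60 by omega), (show ¬((60:Int) < b) by omega), (show b ≤ 70 by omega), (show ¬((70:Int) < b) by omega), (show b ≤ 80 by omega), (show ¬((80:Int) < b) by omega), (show b ≤ 90 by omega), (show ¬((90:Int) < b) by omega), (show b ≤ 100 by omega), (show ¬((100:Int) < b) by omega), (show b ≤ 110 by omega), (show ¬((110:Int) < b) by omega), (show b ≤ 120 by omega), (show ¬((120:Int) < b) by omega), (show b ≤ 128 by omega), (show ¬((128:Int) < b) by omega)]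
  by_cases h40 : b ≤ 40
  · simp [pvScanA, pvParamsA, pvBisect, pvThresholds, pvValues, (show ¬(b ≤ 30) by omega), (show (30:Int) < b by omega), (show b ≤ 40 by omega), (show ¬((40:Int) < b) by omega), (show b ≤ 50 by omega), (show ¬((50:Int) < b) by omega), (show b ≤ 60 by omega), (show ¬((60:Int) < b) by omega), (show b ≤ 70 by omega), (show ¬((70:Int) < b) by omega), (show b ≤ 80 by omega), (show ¬((80:Int) < b) by omega), (show b ≤ 90 by omega), (show ¬((90:Int) < b) by omega), (show b ≤ 100 by omega), (show ¬((100:Int) < b) by omega), (show b ≤ 110 by omega), (show ¬((110:Int) < b) by omega), (show b ≤ 120 by omega), (show ¬((120:Int) < b) by omega), (show b ≤ 128 by omega), (show ¬((128:Int) < b) by omega)]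
  by_cases h50 : b ≤ 50
  · simp [pvScanA, pvParamsA, pvBisect, pvThresholds, pvValues, (show ¬(b ≤ 30) by omega), (show (30:Int) < b by omega), (show ¬(b ≤ 40) by omega), (show (40:Int) < b by omega), (show b ≤ 50 by omega), (show ¬((50:Int) < b) by omega), (show b ≤ 60 by omega), (show ¬((60:Int) < b) by omega), (show b ≤ 70 by omega), (show ¬((70:Int) < b) by omega), (show b ≤ 80 by omega), (show ¬((80:Int) < b) by omega), (show b ≤ 90 by omega), (show ¬((90:Int) < b) by omega), (show b ≤ 100 by omega), (show ¬((100:Int) < b) by omega), (show b ≤ 110 by omega), (show ¬((110:Int) < b) by omega), (show b ≤ 120 by omega), (show ¬((120:Int) < b) by omega), (show b ≤ 128 by omega), (show ¬((128:Int) < b) by omega)]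
  by_cases h60 : b ≤ 60
  · simp [pvScanA, pvParamsA, pvBisect, pvThresholds, pvValues, (show ¬(b ≤ 30) by omega), (show (30:Int) < b by omega), (show ¬(b ≤ 40) by omega), (show (40:Int) < b by omega), (show ¬(b ≤ 50) by omega), (show (50:Int) < b by omega), (show b ≤ 60 by omega), (show ¬((60:Int) < b) by omega), (show b ≤ 70 by omega), (show ¬((70:Int) < b) by omega), (show b ≤ 80 by omega), (show ¬((80:Int) < b) by omega), (show b ≤ 90 by omega), (show ¬((90:Int) < b) by omega), (show b ≤ 100 by omega), (show ¬((100:Int) < b) by omega), (show b ≤ 110 by omega), (show ¬((110:Int) < b) by omega), (show b ≤ 120 by omega), (show ¬((120:Int) < b) by omega), (show b ≤ 128 by omega), (show ¬((128:Int) < b) by omega)]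
  by_cases h70 : b ≤ 70
  · simp [pvScanA, pvParamsA, pvBisect, pvThresholds, pvValues, (show ¬(b ≤ 30) by omega), (show (30:Int) < b by omega), (show ¬(b ≤ 40) by omega), (show (40:Int) < b by omega), (show ¬(b ≤ 50) by omega), (show (50:Int) < b by omega), (show ¬(b ≤ 60) by omega), (show (60:Int) < b by omega), (show b ≤ 70 by omega), (show ¬((70:Int) < b) by omega), (show b ≤ 80 by omega), (show ¬((80:Int) < b) by omega), (show b ≤ 90 by omega), (show ¬((90:Int) < b) by omega), (show b ≤ 100 by omega), (show ¬((100:Int) < b) by omega), (show b ≤ 110 by omega), (show ¬((110:Int) < b) by omega), (show b ≤ 120 by omega), (show ¬((120:Int) < b) by omega), (show b ≤ 128 by omega), (show ¬((128:Int) < b) by omega)]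
  by_cases h80 : b ≤ 80
  · simp [pvScanA, pvParamsA, pvBisect, pvThresholds, pvValues, (show ¬(b ≤ 30) by omega), (show (30:Int) < b by omega), (show ¬(b ≤ 40) by omega), (show (40:Int) < b by omega), (show ¬(b ≤ 50) by omega), (show (50:Int) < b by omega), (show ¬(b ≤ 60) by omega), (show (60:Int) < b by omega), (show ¬(b ≤ 70) by omega), (show (70:Int) < b by omega), (show b ≤ 80 by omega), (show ¬((80:Int) < b) by omega), (show b ≤ 90 by omega), (show ¬((90:Int) < b) by omega), (show b ≤ 100 by omega), (show ¬((100:Int) < b) by omega), (show b ≤ 110 by omega), (show ¬((110:Int) < b) by omega), (show b ≤ 120 by omega), (show ¬((120:Int) < b) by omega), (show b ≤ 128 by omega), (show ¬((128:Int) < b) by omega)]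
  by_cases h90 : b ≤ 90
  · simp [pvScanA, pvParamsA, pvBisect, pvThresholds, pvValues, (show ¬(b ≤ 30) by omega), (show (30:Int) < b by omega), (show ¬(b ≤ 40) by omega), (show (40:Int) < b by omega), (show ¬(b ≤ 50) by omega), (show (50:Int) < b by omega), (show ¬(b ≤ 60) by omega), (show (60:Int) < b by omega), (show ¬(b ≤ 70) by omega), (show (70:Int) < b by omega), (show ¬(b ≤ 80) by omega), (show (80:Int) < b by omega), (show b ≤ 90 by omega), (show ¬((90:Int) < b) by omega), (show b ≤ 100 by omega), (show ¬((100:Int) < b) by omega), (show b ≤ 110 by omega), (show ¬((110:Int) < b) by omega), (show b ≤ 120 by omega), (show ¬((120:Int) < b) by omega), (show b ≤ 128 by omega), (show ¬((128:Int) < b) by omega)]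
  by_cases h100 : b ≤ 100
  · simp [pvScanA, pvParamsA, pvBisect, pvThresholds, pvValues, (show ¬(b ≤ 30) by omega), (show (30:Int) < b by omega), (show ¬(b ≤ 40) by omega), (show (40:Int) < b by omega), (show ¬(b ≤ 50) by omega), (show (50:Int) < b by omega), (show ¬(b ≤ 60) by omega), (show (60:Int) < b by omega), (show ¬(b ≤ 70) by omega), (show (70:Int) < b by omega), (show ¬(b ≤ 80) by omega), (show (80:Int) < b by omega), (show ¬(b ≤ 90) by omega), (show (90:Int) < b by omega), (show b ≤ 100 by omega), (show ¬((100:Int) < b) by omega), (show b ≤ 110 by omega), (show ¬((110:Int) < b) by omega), (show b ≤ 120 by omega), (show ¬((120:Int) < b) by omega), (show b ≤ 128 by omega), (show ¬((128:Int) < b) by omega)]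
  by_cases h110 : b ≤ 110
  · simp [pvScanA, pvParamsA, pvBisect, pvThresholds, pvValues, (show ¬(b ≤ 30) by omega), (show (30:Int) < b by omega), (show ¬(b ≤ 40) by omega), (show (40:Int) < b by omega), (show ¬(b ≤ 50) by omega), (show (50:Int) < b by omega), (show ¬(b ≤ 60) by omega), (show (60:Int) < b by omega), (show ¬(b ≤ 70) by omega), (show (70:Int) < b by omega), (show ¬(b ≤ 80) by omega), (show (80:Int) < b by omega), (show ¬(b ≤ 90) by omega), (show (90:Int) < b by omega), (show ¬(b ≤ 100) by omega), (show (100:Int) < b by omega), (show b ≤ 110 by omega), (show ¬((110:Int) < b) by omega), (show b ≤ 120 by omega), (show ¬((120:Int) < b) by omega), (show b ≤ 128 by omega), (show ¬((128:Int) < b) by omega)]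
  by_cases h120 : b ≤ 120
  · simp [pvScanA, pvParamsA, pvBisect, pvThresholds, pvValues, (show ¬(b ≤ 30) by omega), (show (30:Int) < b by omega), (show ¬(b ≤ 40) by omega), (show (40:Int) < b by omega), (show ¬(b ≤ 50) by omega), (show (50:Int) < b by omega), (show ¬(b ≤ 60) by omega), (show (60:Int) < b by omega), (show ¬(b ≤ 70) by omega), (show (70:Int) < b by omega), (show ¬(b ≤ 80) by omega), (show (80:Int) < b by omega), (show ¬(b ≤ 90) by omega), (show (90:Int) < b by omega), (show ¬(b ≤ 100) by omega), (show (100:Int) < b by omega), (show ¬(b ≤ 110) by omega), (show (110:Int) < b by omega), (show b ≤ 120 by omega), (show ¬((120:Int) < b) by omega), (show b ≤ 128 by omega), (show ¬((128:Int) < b) by omega)]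
  by_cases h128 : b ≤ 128
  · simp [pvScanA, pvParamsA, pvBisect, pvThresholds, pvValues, (show ¬(b ≤ 30) by omega), (show (30:Int) < b by omega), (show ¬(b ≤ 40) by omega), (show (40:Int) < b by omega), (show ¬(b ≤ 50) by omega), (show (50:Int) < b by omega), (show ¬(b ≤ 60) by omega), (show (60:Int) < b by omega), (show ¬(b ≤ 70) by omega), (show (70:Int) < b by omega), (show ¬(b ≤ 80) by omega), (show (80:Int) < b by omega), (show ¬(b ≤ 90) by omega), (show (90:Int) < b by omega), (show ¬(b ≤ 100) by omega), (show (100:Int) < b by omega), (show ¬(b ≤ 110) by omega), (show (110:Int) < b by omega), (show ¬(b ≤ 120) by omega), (show (120:Int) < b by omega), (show b ≤ 128 by omega), (show ¬((128:Int) < b) by omega)]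
  simp [pvScanA, pvParamsA, pvBisect, pvThresholds, pvValues, (show ¬(b ≤ 30) by omega), (show (30:Int) < b by omega), (show ¬(b ≤ 40) by omega), (show (40:Int) < b by omega), (show ¬(b ≤ 50) by omega), (show (50:Int) < b by omega), (show ¬(b ≤ 60) by omega), (show (60:Int) < b by omega), (show ¬(b ≤ 70) by omega), (show (70:Int) < b by omega), (show ¬(b ≤ 80) by omega), (show (80:Int) < b by omega), (show ¬(b ≤ 90) by omega), (show (90:Int) < b by omega), (show ¬(b ≤ 100) by omega), (show (100:Int) < b by omega), (show ¬(b ≤ 110) by omega), (show (110:Int) < b by omega), (show ¬(b ≤ 120) by omega), (show (120:Int) < b by omega), (show ¬(b ≤ 128) by omega), (show (128:Int) < b by omega)]
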